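-- pv_equiv track=rewrite | github.com/alhassanaraouf/IO-Analytix | Sentiment/Sentiment.py | is_cap_diff
-- ===== SOURCE A (Python) =====
-- def is_cap_diff(words):
--     is_different = False
--     allcap_words = 0
--     for word in words.split():
--         if word.isupper():
--             allcap_words += 1
--     cap_differential = len(words.split()) - allcap_words
--     if 0 < cap_differential < len(words.split()):
--         is_different = True
--     return is_different
-- ===== SOURCE B (Python) =====
-- def is_cap_diff(words):
--     flags = {w.isupper() for w in words.split()}
--     return len(flags) == 2
-- ===== Notes on version B (the rewrite author's own statement) =====
-- stated objective: simpler
-- what changed: Replaces the all-caps counter and the two-sided 0 < total-count < total inequality by collecting the set of distinct per-word isupper flags in one comprehension and testing that both flag values occur (set size 2).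
import Mathlib
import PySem

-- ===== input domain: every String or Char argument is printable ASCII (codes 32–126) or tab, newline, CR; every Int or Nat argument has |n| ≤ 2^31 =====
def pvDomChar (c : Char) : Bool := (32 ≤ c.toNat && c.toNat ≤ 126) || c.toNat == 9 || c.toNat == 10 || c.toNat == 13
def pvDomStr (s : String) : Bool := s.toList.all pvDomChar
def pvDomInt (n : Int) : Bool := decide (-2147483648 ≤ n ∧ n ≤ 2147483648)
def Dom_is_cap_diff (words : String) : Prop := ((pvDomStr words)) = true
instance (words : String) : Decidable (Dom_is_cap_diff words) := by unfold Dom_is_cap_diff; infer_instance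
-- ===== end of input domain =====

-- B replaces the all-caps counter and the 0 < total-count < total inequality by the set of
-- distinct per-word isupper flags and a size-2 test (objective: simpler).

-- Python str.isupper(): at least one cased character and no lowercase character.
-- Exact on the printable-ASCII domain, where the cased characters are exactly the letters.
def pyStrIsupper (w : String) : Bool :=
  w.toList.any PySem.Chars.isupper && !(w.toList.any PySem.Chars.islower)

-- ===== PORT A =====
def is_cap_diff (words : String) : Bool :=
  let allcap_words : Int :=
    (PySem.Str.split₀ words).foldl
      (fun acc word => if pyStrIsupper word then acc + 1 else acc) 0
  let cap_differential : Int := ((PySem.Str.split₀ words).length : Int) - allcap_words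
  if 0 < cap_differential ∧ cap_differential < ((PySem.Str.split₀ words).length : Int) then
    true
  else
    false

-- ===== PORT B =====
def is_cap_diff_alt (words : String) : Bool :=
  let flags : PySem.Set Bool := PySem.Set.ofList ((PySem.Str.split₀ words).map pyStrIsupper)
  decide (flags.length = 2)

-- ===== PRECONDITION & SPEC =====
def Spec_is_cap_diff (words : String) (out : Bool) : Prop := out = is_cap_diff_alt words
instance (words : String) (out : Bool) : Decidable (Spec_is_cap_diff words out) := by unfold Spec_is_cap_diff; infer_instance

-- ===== CLAIM (what is proved, stated in full; the proofs are below) =====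
def Claim_equal_is_cap_diff : Prop := ∀ (words : String), Dom_is_cap_diff words → Spec_is_cap_diff words (is_cap_diff words)

-- ===== LEMMAS AND PROOFS =====

-- A's counter fold is countP (as an Int), shifted by the accumulator.
theorem foldl_count_eq (l : List String) (acc : Int) :
    l.foldl (fun acc word => if pyStrIsupper word then acc + 1 else acc) acc
      = acc + (l.countP pyStrIsupper : Int) := by
  induction l generalizing acc with
  | nil => simp
  | cons w l ih =>
    simp only [List.foldl_cons, List.countP_cons, ih]
    by_cases h : pyStrIsupper w = true <;> simp [h] <;> ring

theorem ofList_bool_len_two (l : List Bool) :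
    (PySem.Set.ofList l).length = 2 ↔ (true ∈ l ∧ false ∈ l) := by
  have hnd : (PySem.Set.ofList l).Nodup := by simpa using PySem.List.nodup_dedup l
  have hmem : ∀ b : Bool, (b ∈ PySem.Set.ofList l ↔ b ∈ l) := by
    intro b; simpa using PySem.List.mem_dedup (x := b) (xs := l)
  constructor
  · intro h2
    constructor
    · by_contra ht
      have hsub : PySem.Set.ofList l ⊆ [false] := by
        intro b hb
        cases b
        · simp
        · exact absurd ((hmem true).mp hb) ht
      have := (List.subperm_of_subset hnd hsub).length_le
      simp at this; omega
    · by_contra hf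
      have hsub : PySem.Set.ofList l ⊆ [true] := by
        intro b hb
        cases b
        · exact absurd ((hmem false).mp hb) hf
        · simp
      have := (List.subperm_of_subset hnd hsub).length_le
      simp at this; omega
  · rintro ⟨ht, hf⟩
    have hsub : PySem.Set.ofList l ⊆ [true, false] := by
      intro b _; cases b <;> simp
    have hsub' : [true, false] ⊆ PySem.Set.ofList l := by
      intro b hb
      rcases List.mem_cons.mp hb with hb | hb
      · subst hb; exact (hmem true).mpr ht
      · simp only [List.mem_singleton] at hb; subst hb; exact (hmem false).mpr hf
    have h1 := (List.subperm_of_subset hnd hsub).length_le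
    have h2 := (List.subperm_of_subset (by decide : ([true,false] : List Bool).Nodup) hsub').length_le
    simp at h1 h2; omega

theorem countP_flags (l : List String) :
    l.countP pyStrIsupper = (l.map pyStrIsupper).count true ∧
    l.length - l.countP pyStrIsupper = (l.map pyStrIsupper).count false := by
  constructor
  · simp [List.count_eq_countP, List.countP_map, Function.comp_def]
  · have h : l.countP (fun w => pyStrIsupper w = false) = l.length - l.countP pyStrIsupper := by
      have := List.length_eq_countP_add_countP (p := pyStrIsupper) (l := l)
      have hc : l.countP (fun w => ¬ pyStrIsupper w = true) =
          l.countP (fun w => pyStrIsupper w = false) := by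
        apply List.countP_congr; intro w _; simp
      omega
    rw [← h]
    simp [List.count_eq_countP, List.countP_map, Function.comp_def]

theorem is_cap_diff_spec : Claim_equal_is_cap_diff := by
  intro words _
  unfold Spec_is_cap_diff is_cap_diff is_cap_diff_alt
  simp only []
  set l := PySem.Str.split₀ words with hl
  rw [foldl_count_eq]
  rcases countP_flags l with ⟨hct, hcf⟩
  have hk : l.countP pyStrIsupper ≤ l.length := List.countP_le_length
  have htrue : true ∈ l.map pyStrIsupper ↔ 0 < l.countP pyStrIsupper := by
    rw [← List.count_pos_iff, ← hct]
  have hfalse : false ∈ l.map pyStrIsupper ↔ l.countP pyStrIsupper < l.length := by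
    rw [← List.count_pos_iff, ← hcf]; omega
  by_cases h : 0 < l.countP pyStrIsupper ∧ l.countP pyStrIsupper < l.length
  · rw [if_pos (by omega), eq_comm, decide_eq_true_iff, ofList_bool_len_two]
    exact ⟨htrue.mpr h.1, hfalse.mpr h.2⟩
  · rw [if_neg (by omega), eq_comm, decide_eq_false_iff_not, ofList_bool_len_two]
    rw [not_and_or] at h ⊢
    rcases h with h | h
    · exact Or.inl (fun c => h (htrue.mp c))
    · exact Or.inr (fun c => h (hfalse.mp c))
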